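-- pv_equiv track=rewrite | github.com/SVIPdb/svip | svip_api/api/management/commands/standardize_variant_names.py | end_section
-- ===== SOURCE A (Python) =====
-- def end_section(variant_name):
--     search_digit = True
--     counter = 0
--     for char in variant_name:
--         if search_digit:
--             if char.isdigit():
--                 search_digit = False
--         else:
--             if not char.isdigit():
--                 return variant_name[counter:]
--         counter += 1
-- ===== SOURCE B (Python) =====
-- def end_section(variant_name):
--     first = next((i for i, c in enumerate(variant_name) if c.isdigit()), None)
--     if first is None:
--         return None
--     run = next((j for j, c in enumerate(variant_name[first:]) if not c.isdigit()), None)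
--     if run is None:
--         return None
--     return variant_name[first + run:]
-- ===== Notes on version B (the rewrite author's own statement) =====
-- stated objective: simpler
-- what changed: Replaces A's single flag-driven loop with mutable state (search_digit, counter) by two explicit searches: find the index of the first digit, then the first non-digit within the suffix, and slice there.
import Mathlib
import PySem

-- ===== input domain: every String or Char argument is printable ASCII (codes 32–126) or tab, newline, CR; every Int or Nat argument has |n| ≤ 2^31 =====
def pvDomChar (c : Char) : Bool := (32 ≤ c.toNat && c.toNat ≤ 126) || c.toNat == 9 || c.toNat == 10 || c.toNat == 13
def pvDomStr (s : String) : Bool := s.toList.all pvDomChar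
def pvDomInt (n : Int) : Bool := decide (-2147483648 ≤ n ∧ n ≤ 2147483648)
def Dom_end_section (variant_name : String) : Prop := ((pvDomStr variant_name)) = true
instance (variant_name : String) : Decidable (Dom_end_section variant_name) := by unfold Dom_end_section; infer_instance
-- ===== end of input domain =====

-- B replaces A's flag-driven single loop by two explicit searches (first digit, then first non-digit in the suffix); objective: simpler decomposition, same cost.


-- ===== PORT A =====
-- loop over the characters carrying A's state (search_digit, counter); 'return variant_name[counter:]' is the Python slice
def endALoop (full : String) (chars : List Char) (searchDigit : Bool) (counter : Int) : Option String :=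
  match chars with
  | [] => none
  | c :: rest =>
    if searchDigit then
      endALoop full rest (if PySem.Chars.isdigit c then false else searchDigit) (counter + 1)
    else
      if !PySem.Chars.isdigit c then some (PySem.Str.slice full (some counter) none)
      else endALoop full rest searchDigit (counter + 1)

def end_section (variant_name : String) : Option String :=
  endALoop variant_name variant_name.toList true 0

-- ===== PORT B =====
def end_section_alt (variant_name : String) : Option String :=
  match variant_name.toList.findIdx? (fun c => PySem.Chars.isdigit c) with
  | none => none
  | some first =>
    match (PySem.Str.slice variant_name (some (first : Int)) none).toList.findIdx?
        (fun c => !PySem.Chars.isdigit c) with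
    | none => none
    | some run => some (PySem.Str.slice variant_name (some ((first : Int) + (run : Int))) none)

-- ===== PRECONDITION & SPEC =====
def Spec_end_section (variant_name : String) (out : Option String) : Prop := out = end_section_alt variant_name
instance (variant_name : String) (out : Option String) : Decidable (Spec_end_section variant_name out) := by unfold Spec_end_section; infer_instance

-- ===== CLAIM (what is proved, stated in full; the proofs are below) =====
def Claim_equal_end_section : Prop := ∀ (variant_name : String), Dom_end_section variant_name → Spec_end_section variant_name (end_section variant_name)

-- ===== LEMMAS AND PROOFS =====

-- the not-searching phase of A's loop is a first-non-digit search
theorem endALoop_false (full : String) (t : List Char) (k : Nat) :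
    endALoop full t false (k : Int) =
      (t.findIdx? (fun c => !PySem.Chars.isdigit c)).map
        (fun j => PySem.Str.slice full (some ((k + j : Nat) : Int)) none) := by
  induction t generalizing k with
  | nil => simp [endALoop]
  | cons c rest ih =>
    by_cases h : PySem.Chars.isdigit c = true
    · have : endALoop full (c :: rest) false (k : Int) = endALoop full rest false ((k : Int) + 1) := by
        simp [endALoop, h]
      rw [this]
      have : ((k : Int) + 1) = ((k + 1 : Nat) : Int) := by push_cast; ring
      rw [this, ih (k + 1)]
      simp [List.findIdx?_cons, h, Option.map_map]
      congr 1
      funext j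
      congr 2
      push_cast; ring
    · simp only [Bool.not_eq_true] at h
      simp [endALoop, h, List.findIdx?_cons]

-- the searching phase of A's loop finds the first digit, then hands over to the other phase
theorem endALoop_true (full : String) (t : List Char) (k : Nat) :
    endALoop full t true (k : Int) =
      match t.findIdx? (fun c => PySem.Chars.isdigit c) with
      | none => none
      | some j => endALoop full (t.drop (j + 1)) false ((k + j + 1 : Nat) : Int) := by
  induction t generalizing k with
  | nil => simp [endALoop]
  | cons c rest ih =>
    by_cases h : PySem.Chars.isdigit c = true
    · have e1 : endALoop full (c :: rest) true (k : Int) = endALoop full rest false ((k : Int) + 1) := by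
        simp [endALoop, h]
      rw [e1]
      simp [List.findIdx?_cons, h]
    · simp only [Bool.not_eq_true] at h
      have e1 : endALoop full (c :: rest) true (k : Int) = endALoop full rest true ((k : Int) + 1) := by
        simp [endALoop, h]
      rw [e1]
      have : ((k : Int) + 1) = ((k + 1 : Nat) : Int) := by push_cast; ring
      rw [this, ih (k + 1)]
      simp [List.findIdx?_cons, h]
      rcases hf : rest.findIdx? (fun c => PySem.Chars.isdigit c) with _ | j
      · simp
      · simp
        congr 2
        omega

theorem end_section_spec : Claim_equal_end_section := by
  intro v _
  unfold Spec_end_section end_section end_section_alt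
  have h0 := endALoop_true v v.toList 0
  norm_num at h0
  rw [h0]
  rcases hf : v.toList.findIdx? (fun c => PySem.Chars.isdigit c) with _ | f
  · simp
  · simp only
    have hflen : f < v.toList.length := (List.findIdx?_eq_some_iff_findIdx_eq.mp hf).1
    have hfd : PySem.Chars.isdigit v.toList[f] = true := by
      have h1 := List.of_findIdx?_eq_some hf
      simpa [List.getElem?_eq_getElem hflen] using h1
    have hdrop : v.toList.drop f = v.toList[f] :: v.toList.drop (f + 1) :=
      List.drop_eq_getElem_cons hflen
    have hsl : (PySem.Str.slice v (some (f : Int)) none).toList = v.toList.drop f := by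
      rw [PySem.Str.toList_slice]
      simp [PySem.Chars.slice_eq_listSlice, PySem.List.slice_from_natCast]
    rw [hsl, hdrop, List.findIdx?_cons]
    simp only [hfd, Bool.not_true, Bool.false_eq_true, if_false]
    rw [show ((f : Int) + 1) = ((f + 1 : Nat) : Int) by push_cast; ring,
      endALoop_false v (v.toList.drop (f + 1)) (f + 1)]
    rcases hg : (v.toList.drop (f + 1)).findIdx? (fun c => !PySem.Chars.isdigit c) with _ | j
    · simp
    · simp only [Option.map_some]
      congr 2
      push_cast
      ring
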